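-- pv_equiv track=rewrite | github.com/ysig/learnable-typewriter | learnable_typewriter/evaluate/quantitative/sprite_matching/utils.py | sort_mapping
-- ===== SOURCE A (Python) =====
-- import string
--
-- def sort_dict(dictionnary):
--     return(dict(sorted(dictionnary.items(), key=lambda dictionnary: dictionnary[1])))
--
-- def sort_mapping(mapping, K):
--
--     lower_case, upper_case, punctuation  = {}, {}, {}
--     for k in range(K):
--         char = mapping.get(k, '_')
--         if char in string.punctuation:
--             punctuation[k] = char
--         else:
--             if char.isupper():
--                 upper_case[k] = char
--             else:
--                 lower_case[k] = char
--     return {**sort_dict(lower_case), **sort_dict(upper_case), **punctuation}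
-- ===== SOURCE B (Python) =====
-- import string
--
-- def sort_mapping(mapping, K):
--     def key(item):
--         ch = item[1]
--         if ch in string.punctuation:
--             return (2, '')        # constant tie: stable sort keeps punctuation in k order
--         if ch.isupper():
--             return (1, ch)
--         return (0, ch)
--     pairs = [(k, mapping.get(k, '_')) for k in range(K)]
--     return dict(sorted(pairs, key=key))
-- ===== Notes on version B (the rewrite author's own statement) =====
-- stated objective: alternative
-- what changed: Replaces the three-dict partition with two separate value-sorts and a dict merge by building one (k, char) list and sorting it once with a composite (category-rank, tie) key, the tie being constant for punctuation so stability keeps its original k order.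
import Mathlib
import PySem

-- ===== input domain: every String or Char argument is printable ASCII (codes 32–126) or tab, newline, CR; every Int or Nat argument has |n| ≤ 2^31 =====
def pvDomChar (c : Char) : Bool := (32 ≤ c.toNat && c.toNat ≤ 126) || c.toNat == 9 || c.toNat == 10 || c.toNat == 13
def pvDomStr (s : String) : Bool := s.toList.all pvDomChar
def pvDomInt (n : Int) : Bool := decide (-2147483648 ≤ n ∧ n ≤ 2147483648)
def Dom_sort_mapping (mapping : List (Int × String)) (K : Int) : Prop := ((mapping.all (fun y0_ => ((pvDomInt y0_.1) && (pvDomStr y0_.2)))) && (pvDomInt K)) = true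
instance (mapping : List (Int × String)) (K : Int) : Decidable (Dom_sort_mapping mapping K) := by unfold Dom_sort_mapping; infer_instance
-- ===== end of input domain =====

-- B replaces A's three-dict partition + two value-sorts + merge by a single stable sort of one (k, char) list under a composite (category-rank, tie) key; alternative decomposition, same cost. 


-- ===== PORT A =====
-- string.punctuation
def pvPunctuation : String := "!\"#$%&'()*+,-./:;<=>?@[\\]^_`{|}~"

-- str.isupper(): at least one uppercase letter and no lowercase one (exact on the printable-ASCII domain)
def pvStrIsupper (s : String) : Bool := s.toList.any PySem.Chars.isupper && !s.toList.any PySem.Chars.islower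

-- sort_dict: dict(sorted(d.items(), key=lambda it: it[1]))
def pvSortDict (d : PySem.Dict Int String) : PySem.Dict Int String :=
  PySem.Dict.ofList (PySem.List.sorted d.items (fun p => p.2))

def sort_mapping (mapping : List (Int × String)) (K : Int) : List (Int × String) :=
  let m := PySem.Dict.ofList mapping
  let r := (PySem.List.pyRange 0 K).foldl
    (fun (acc : PySem.Dict Int String × PySem.Dict Int String × PySem.Dict Int String) k =>
      let char := m.getD k "_"
      if PySem.Str.isIn char pvPunctuation then (acc.1, acc.2.1, acc.2.2.insert k char)
      else if pvStrIsupper char then (acc.1, acc.2.1.insert k char, acc.2.2)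
      else (acc.1.insert k char, acc.2.1, acc.2.2))
    (PySem.Dict.empty, PySem.Dict.empty, PySem.Dict.empty)
  (((pvSortDict r.1).update (pvSortDict r.2.1).items).update r.2.2.items).items

-- ===== PORT B =====
-- key(item): (2,'') for punctuation (constant tie keeps k order by stability), (1,ch) for upper, (0,ch) otherwise
def pvKey (item : Int × String) : Int × String :=
  if PySem.Str.isIn item.2 pvPunctuation then (2, "")
  else if pvStrIsupper item.2 then (1, item.2)
  else (0, item.2)

def sort_mapping_alt (mapping : List (Int × String)) (K : Int) : List (Int × String) :=
  let m := PySem.Dict.ofList mapping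
  let pairs := (PySem.List.pyRange 0 K).map (fun k => (k, m.getD k "_"))
  (PySem.Dict.ofList (PySem.List.sorted2 pairs (fun it => (pvKey it).1) (fun it => (pvKey it).2))).items

-- ===== PRECONDITION & SPEC =====
def Spec_sort_mapping (mapping : List (Int × String)) (K : Int) (out : List (Int × String)) : Prop := out = sort_mapping_alt mapping K
instance (mapping : List (Int × String)) (K : Int) (out : List (Int × String)) : Decidable (Spec_sort_mapping mapping K out) := by unfold Spec_sort_mapping; infer_instance

-- ===== CLAIM (what is proved, stated in full; the proofs are below) =====
def Claim_equal_sort_mapping : Prop := ∀ (mapping : List (Int × String)) (K : Int), Dom_sort_mapping mapping K → Spec_sort_mapping mapping K (sort_mapping mapping K)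

-- ===== LEMMAS AND PROOFS =====

-- the stability order: key strictly less, or key equal and original position (g) strictly less
def pvRk {α κ : Type} [LinearOrder κ] (key : α → κ) (g : α → Int) (a b : α) : Prop :=
  key a < key b ∨ (key a = key b ∧ g a < g b)

theorem pvInsertBy_stable {α κ : Type} [LinearOrder κ] (key : α → κ) (g : α → Int)
    (x : α) (acc : List α) (ha : acc.Pairwise (pvRk key g)) (hx : ∀ a ∈ acc, g a < g x) :
    (PySem.List.insertBy (fun a b => decide (key a < key b)) x acc).Pairwise (pvRk key g) := by
  induction acc with
  | nil => simp [PySem.List.insertBy]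
  | cons y ys ih =>
    rw [List.pairwise_cons] at ha
    obtain ⟨hy, hys⟩ := ha
    by_cases h : key x < key y
    · rw [show PySem.List.insertBy (fun a b => decide (key a < key b)) x (y :: ys)
          = x :: y :: ys by simp [PySem.List.insertBy, h]]
      refine List.Pairwise.cons ?_ (List.Pairwise.cons hy hys)
      intro b hb
      rcases List.mem_cons.mp hb with rfl | hb
      · exact Or.inl h
      · exact Or.inl (lt_of_lt_of_le h (by rcases hy b hb with h' | ⟨h', _⟩ <;> [exact le_of_lt h'; exact le_of_eq h']))
    · rw [show PySem.List.insertBy (fun a b => decide (key a < key b)) x (y :: ys)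
          = y :: PySem.List.insertBy (fun a b => decide (key a < key b)) x ys by simp [PySem.List.insertBy, h]]
      refine List.Pairwise.cons ?_ (ih hys (fun a haa => hx a (List.mem_cons_of_mem y haa)))
      intro b hb
      rw [PySem.List.insertBy_mem_iff] at hb
      rcases hb with rfl | hb
      · rcases lt_or_eq_of_le (not_lt.mp h) with h' | h'
        · exact Or.inl h'
        · exact Or.inr ⟨h'.symm ▸ rfl, hx y (List.mem_cons_self ..)⟩
      · exact hy b hb

theorem pvFoldl_stable {α κ : Type} [LinearOrder κ] (key : α → κ) (g : α → Int) :
    ∀ (xs acc : List α), acc.Pairwise (pvRk key g) →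
    (∀ a ∈ acc, ∀ x ∈ xs, g a < g x) → xs.Pairwise (fun a b => g a < g b) →
    (xs.foldl (fun acc x => PySem.List.insertBy (fun a b => decide (key a < key b)) x acc) acc).Pairwise (pvRk key g) := by
  intro xs
  induction xs with
  | nil => intro acc h _ _; simpa using h
  | cons x xs ih =>
    intro acc h hcross hxs
    rw [List.pairwise_cons] at hxs
    simp only [List.foldl_cons]
    refine ih _ (pvInsertBy_stable key g x acc h
      (fun a ha => hcross a ha x (List.mem_cons_self ..))) ?_ hxs.2
    intro a ha x' hx'
    rw [PySem.List.insertBy_mem_iff] at ha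
    rcases ha with rfl | ha
    · exact hxs.1 x' hx'
    · exact hcross a ha x' (List.mem_cons_of_mem x hx')

theorem pvSorted_stable {α κ : Type} [LinearOrder κ] (key : α → κ) (g : α → Int)
    (xs : List α) (h : xs.Pairwise (fun a b => g a < g b)) :
    (PySem.List.sorted xs key).Pairwise (pvRk key g) := by
  rw [PySem.List.sorted_eq_foldl_insertBy]
  exact pvFoldl_stable key g xs [] (by simp) (by simp) h

theorem pvSorted2_eq_sorted_toLex {α κ₁ κ₂ : Type} [LinearOrder κ₁] [LinearOrder κ₂]
    (xs : List α) (k1 : α → κ₁) (k2 : α → κ₂) :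
    PySem.List.sorted2 xs k1 k2 = PySem.List.sorted xs (fun x => toLex (k1 x, k2 x)) := by
  have h : ∀ a b : α, (decide (k1 a < k1 b) || (!decide (k1 b < k1 a) && decide (k2 a < k2 b)))
      = decide (toLex (k1 a, k2 a) < toLex (k1 b, k2 b)) := by
    intro a b
    by_cases h1 : k1 a < k1 b
    · simp [h1, Prod.Lex.toLex_lt_toLex]
    · by_cases h2 : k1 b < k1 a
      · simp [h1, h2, Prod.Lex.toLex_lt_toLex, ne_of_gt h2]
      · have he : k1 a = k1 b := le_antisymm (not_lt.mp h2) (not_lt.mp h1)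
        simp [he, Prod.Lex.toLex_lt_toLex]
  simp only [PySem.List.sorted2, PySem.List.sorted]
  congr 1
  funext acc x
  congr 1
  funext a b
  exact h a b

theorem pvItems_ofList {κ ν : Type} [BEq κ] [LawfulBEq κ] (l : List (κ × ν))
    (h : (l.map Prod.fst).Nodup) : (PySem.Dict.ofList l).items = l := by
  show (List.foldl (fun acc p => acc.insert p.1 p.2) PySem.Dict.empty l).items = l
  rw [PySem.Dict.items_foldl_insert_fresh l Prod.fst Prod.snd PySem.Dict.empty
    (fun a _ => PySem.Dict.contains_empty _) h]
  simp [PySem.Dict.empty]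

theorem pvFoldA (m : PySem.Dict Int String) :
    ∀ (ks : List Int) (lw up pu : PySem.Dict Int String), ks.Nodup →
    (∀ k ∈ ks, lw.contains k = false) → (∀ k ∈ ks, up.contains k = false) →
    (∀ k ∈ ks, pu.contains k = false) →
    ((ks.foldl
      (fun (acc : PySem.Dict Int String × PySem.Dict Int String × PySem.Dict Int String) k =>
        let char := m.getD k "_"
        if PySem.Str.isIn char pvPunctuation then (acc.1, acc.2.1, acc.2.2.insert k char)
        else if pvStrIsupper char then (acc.1, acc.2.1.insert k char, acc.2.2)
        else (acc.1.insert k char, acc.2.1, acc.2.2)) (lw, up, pu)).1.items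
        = lw.items ++ (ks.map (fun k => (k, m.getD k "_"))).filter
        (fun p => !pvStrIsupper p.2 && !PySem.Str.isIn p.2 pvPunctuation)
     ∧ (ks.foldl
      (fun (acc : PySem.Dict Int String × PySem.Dict Int String × PySem.Dict Int String) k =>
        let char := m.getD k "_"
        if PySem.Str.isIn char pvPunctuation then (acc.1, acc.2.1, acc.2.2.insert k char)
        else if pvStrIsupper char then (acc.1, acc.2.1.insert k char, acc.2.2)
        else (acc.1.insert k char, acc.2.1, acc.2.2)) (lw, up, pu)).2.1.items
        = up.items ++ (ks.map (fun k => (k, m.getD k "_"))).filter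
        (fun p => pvStrIsupper p.2 && !PySem.Str.isIn p.2 pvPunctuation)
     ∧ (ks.foldl
      (fun (acc : PySem.Dict Int String × PySem.Dict Int String × PySem.Dict Int String) k =>
        let char := m.getD k "_"
        if PySem.Str.isIn char pvPunctuation then (acc.1, acc.2.1, acc.2.2.insert k char)
        else if pvStrIsupper char then (acc.1, acc.2.1.insert k char, acc.2.2)
        else (acc.1.insert k char, acc.2.1, acc.2.2)) (lw, up, pu)).2.2.items
        = pu.items ++ (ks.map (fun k => (k, m.getD k "_"))).filter
        (fun p => PySem.Str.isIn p.2 pvPunctuation)) := by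
  intro ks
  induction ks with
  | nil => intro lw up pu _ _ _ _; simp
  | cons k ks ih =>
    intro lw up pu hnd hlw hup hpu
    rw [List.nodup_cons] at hnd
    have hne : ∀ k' ∈ ks, (k' == k) = false := by
      intro k' hk'; simp only [beq_eq_false_iff_ne, ne_eq]; rintro rfl; exact hnd.1 hk'
    simp only [List.foldl_cons, List.map_cons, List.filter_cons]
    by_cases hp : PySem.Str.isIn (m.getD k "_") pvPunctuation
    · have := ih lw up (pu.insert k (m.getD k "_")) hnd.2
        (fun a ha => hlw a (List.mem_cons_of_mem _ ha))
        (fun a ha => hup a (List.mem_cons_of_mem _ ha))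
        (fun a ha => by rw [PySem.Dict.contains_insert, hne a ha, Bool.false_or]
                        exact hpu a (List.mem_cons_of_mem _ ha))
      simp only [hp] at this ⊢
      simp only [if_true, Bool.not_true, Bool.and_false, Bool.false_eq_true,
        if_false] at this ⊢
      refine ⟨this.1, this.2.1, ?_⟩
      rw [this.2.2, PySem.Dict.items_insert_of_not_contains _ _ (hpu k (List.mem_cons_self ..))]
      simp
    · by_cases hu : pvStrIsupper (m.getD k "_")
      · have := ih lw (up.insert k (m.getD k "_")) pu hnd.2
          (fun a ha => hlw a (List.mem_cons_of_mem _ ha))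
          (fun a ha => by rw [PySem.Dict.contains_insert, hne a ha, Bool.false_or]
                          exact hup a (List.mem_cons_of_mem _ ha))
          (fun a ha => hpu a (List.mem_cons_of_mem _ ha))
        simp only [hp, hu] at this ⊢
        simp only [if_true, if_false, Bool.false_eq_true, Bool.not_false, Bool.and_true,
          Bool.not_true] at this ⊢
        refine ⟨this.1, ?_, this.2.2⟩
        rw [this.2.1, PySem.Dict.items_insert_of_not_contains _ _ (hup k (List.mem_cons_self ..))]
        simp
      · have := ih (lw.insert k (m.getD k "_")) up pu hnd.2
          (fun a ha => by rw [PySem.Dict.contains_insert, hne a ha, Bool.false_or]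
                          exact hlw a (List.mem_cons_of_mem _ ha))
          (fun a ha => hup a (List.mem_cons_of_mem _ ha))
          (fun a ha => hpu a (List.mem_cons_of_mem _ ha))
        simp only [hp, hu] at this ⊢
        simp only [if_true, if_false, Bool.false_eq_true, Bool.not_false, Bool.and_true] at this ⊢
        refine ⟨?_, this.2.1, this.2.2⟩
        rw [this.1, PySem.Dict.items_insert_of_not_contains _ _ (hlw k (List.mem_cons_self ..))]
        simp

theorem pvRk_antisymm {α κ : Type} [LinearOrder κ] {key : α → κ} {g : α → Int} {a b : α}
    (h1 : pvRk key g a b) (h2 : pvRk key g b a) : a = b := by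
  exfalso
  rcases h1 with h1 | ⟨e1, p1⟩ <;> rcases h2 with h2 | ⟨e2, p2⟩
  · exact lt_asymm h1 h2
  · exact absurd e2.symm (ne_of_lt h1)
  · exact absurd e1 (ne_of_gt h2)
  · exact lt_asymm p1 p2

theorem pvKey_punct {p : Int × String} (h : PySem.Str.isIn p.2 pvPunctuation = true) :
    pvKey p = (2, "") := by unfold pvKey; rw [h]; rfl

theorem pvKey_up {p : Int × String} (h2 : PySem.Str.isIn p.2 pvPunctuation = false)
    (h : pvStrIsupper p.2 = true) : pvKey p = (1, p.2) := by unfold pvKey; rw [h2, h]; rfl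

theorem pvKey_low {p : Int × String} (h2 : PySem.Str.isIn p.2 pvPunctuation = false)
    (h : pvStrIsupper p.2 = false) : pvKey p = (0, p.2) := by unfold pvKey; rw [h2, h]; rfl

theorem pvCrux (L : List (Int × String)) (hLpos : L.Pairwise (fun a b => a.1 < b.1)) :
    PySem.List.sorted L (fun x => toLex (pvKey x))
    = PySem.List.sorted (L.filter (fun p => !pvStrIsupper p.2 && !PySem.Str.isIn p.2 pvPunctuation)) (fun p => p.2)
      ++ PySem.List.sorted (L.filter (fun p => pvStrIsupper p.2 && !PySem.Str.isIn p.2 pvPunctuation)) (fun p => p.2)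
      ++ L.filter (fun p => PySem.Str.isIn p.2 pvPunctuation) := by
  set pLow : Int × String → Bool := fun p => !pvStrIsupper p.2 && !PySem.Str.isIn p.2 pvPunctuation with hpLow
  set pUp : Int × String → Bool := fun p => pvStrIsupper p.2 && !PySem.Str.isIn p.2 pvPunctuation with hpUp
  set P2 : Int × String → Bool := fun p => PySem.Str.isIn p.2 pvPunctuation with hP2
  set S0 := PySem.List.sorted (L.filter pLow) (fun p => p.2) with hS0
  set S1 := PySem.List.sorted (L.filter pUp) (fun p => p.2) with hS1
  -- membership facts
  have hmem0 : ∀ a ∈ S0, pvStrIsupper a.2 = false ∧ PySem.Str.isIn a.2 pvPunctuation = false := by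
    intro a ha
    rw [hS0, PySem.List.mem_sorted, List.mem_filter, hpLow] at ha
    simpa [Bool.and_eq_true, Bool.not_eq_eq_eq_not] using ha.2
  have hmem1 : ∀ a ∈ S1, pvStrIsupper a.2 = true ∧ PySem.Str.isIn a.2 pvPunctuation = false := by
    intro a ha
    rw [hS1, PySem.List.mem_sorted, List.mem_filter, hpUp] at ha
    simpa [Bool.and_eq_true] using ha.2
  have hmem2 : ∀ a ∈ L.filter P2, PySem.Str.isIn a.2 pvPunctuation = true := by
    intro a ha
    rw [List.mem_filter, hP2] at ha
    exact ha.2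
  apply List.Perm.eq_of_pairwise (le := pvRk (fun x => toLex (pvKey x)) Prod.fst)
  · intro a b _ _ h1 h2; exact pvRk_antisymm h1 h2
  · exact pvSorted_stable _ _ L hLpos
  · -- Pairwise on the concatenation
    rw [List.pairwise_append, List.pairwise_append]
    refine ⟨⟨?_, ?_, ?_⟩, ?_, ?_⟩
    · -- S0
      refine (pvSorted_stable (fun p => p.2) Prod.fst (L.filter pLow) (hLpos.filter _)).imp_of_mem ?_
      intro a b ha hb h
      obtain ⟨hu, hp⟩ := hmem0 a ha
      obtain ⟨hu', hp'⟩ := hmem0 b hb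
      rcases h with h | ⟨he, hg⟩
      · refine Or.inl ?_
        show toLex (pvKey a) < toLex (pvKey b)
        rw [pvKey_low hp hu, pvKey_low hp' hu']
        exact Prod.Lex.toLex_lt_toLex.mpr (Or.inr ⟨rfl, h⟩)
      · refine Or.inr ⟨?_, hg⟩
        show toLex (pvKey a) = toLex (pvKey b)
        rw [pvKey_low hp hu, pvKey_low hp' hu']
        exact congrArg (fun s => toLex (((0 : Int)), s)) he
    · -- S1
      refine (pvSorted_stable (fun p => p.2) Prod.fst (L.filter pUp) (hLpos.filter _)).imp_of_mem ?_
      intro a b ha hb h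
      obtain ⟨hu, hp⟩ := hmem1 a ha
      obtain ⟨hu', hp'⟩ := hmem1 b hb
      rcases h with h | ⟨he, hg⟩
      · refine Or.inl ?_
        show toLex (pvKey a) < toLex (pvKey b)
        rw [pvKey_up hp hu, pvKey_up hp' hu']
        exact Prod.Lex.toLex_lt_toLex.mpr (Or.inr ⟨rfl, h⟩)
      · refine Or.inr ⟨?_, hg⟩
        show toLex (pvKey a) = toLex (pvKey b)
        rw [pvKey_up hp hu, pvKey_up hp' hu']
        exact congrArg (fun s => toLex (((1 : Int)), s)) he
    · -- cross S0 → S1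
      intro a ha b hb
      refine Or.inl ?_
      show toLex (pvKey a) < toLex (pvKey b)
      rw [pvKey_low (hmem0 a ha).2 (hmem0 a ha).1, pvKey_up (hmem1 b hb).2 (hmem1 b hb).1]
      exact Prod.Lex.toLex_lt_toLex.mpr (Or.inl (by norm_num))
    · -- punctuation block
      refine ((hLpos.filter P2).imp_of_mem ?_)
      intro a b ha hb h
      refine Or.inr ⟨?_, h⟩
      show toLex (pvKey a) = toLex (pvKey b)
      rw [pvKey_punct (hmem2 a ha), pvKey_punct (hmem2 b hb)]
    · -- cross (S0 ++ S1) → punct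
      intro a ha b hb
      rw [List.mem_append] at ha
      refine Or.inl ?_
      show toLex (pvKey a) < toLex (pvKey b)
      rw [pvKey_punct (hmem2 b hb)]
      rcases ha with ha | ha
      · rw [pvKey_low (hmem0 a ha).2 (hmem0 a ha).1]
        exact Prod.Lex.toLex_lt_toLex.mpr (Or.inl (by norm_num))
      · rw [pvKey_up (hmem1 a ha).2 (hmem1 a ha).1]
        exact Prod.Lex.toLex_lt_toLex.mpr (Or.inl (by norm_num))
  · -- the permutation
    have hnn : ∀ (l : List (Int × String)) (q : Int × String → Bool),
        l.filter (fun x => !(!q x)) = l.filter q := by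
      intro l q; simp
    have h01 : (S0 ++ S1).Perm (L.filter (fun p => !P2 p)) := by
      refine ((PySem.List.sorted_perm _ _ _).append (PySem.List.sorted_perm _ _ _)).trans ?_
      rw [hpLow, hpUp, hP2]
      rw [show (fun p : Int × String => !pvStrIsupper p.2 && !PySem.Str.isIn p.2 pvPunctuation)
            = fun p : Int × String => (fun q : Int × String => !pvStrIsupper q.2) p
              && (fun q : Int × String => !PySem.Str.isIn q.2 pvPunctuation) p from rfl,
          ← List.filter_filter,
          show (fun p : Int × String => pvStrIsupper p.2 && !PySem.Str.isIn p.2 pvPunctuation)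
            = fun p : Int × String => (fun q : Int × String => pvStrIsupper q.2) p
              && (fun q : Int × String => !PySem.Str.isIn q.2 pvPunctuation) p from rfl,
          ← List.filter_filter]
      have := List.filter_append_perm (fun q : Int × String => !pvStrIsupper q.2)
        (L.filter (fun q : Int × String => !PySem.Str.isIn q.2 pvPunctuation))
      rw [hnn] at this
      exact this
    have h2 : ((L.filter (fun p => !P2 p)) ++ L.filter P2).Perm L := by
      have := List.filter_append_perm (fun p : Int × String => !P2 p) L
      rw [hnn] at this
      exact this
    exact (PySem.List.sorted_perm _ _ _).trans ((h01.append (List.Perm.refl _)).trans h2).symm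

theorem sort_mapping_eq (mapping : List (Int × String)) (K : Int) :
    sort_mapping mapping K = sort_mapping_alt mapping K := by
  unfold sort_mapping sort_mapping_alt
  set m := PySem.Dict.ofList mapping with hm
  set ks := PySem.List.pyRange 0 K with hks
  set L := ks.map (fun k => (k, m.getD k "_")) with hL
  set pLow : Int × String → Bool := fun p => !pvStrIsupper p.2 && !PySem.Str.isIn p.2 pvPunctuation with hpLow
  set pUp : Int × String → Bool := fun p => pvStrIsupper p.2 && !PySem.Str.isIn p.2 pvPunctuation with hpUp
  set P2 : Int × String → Bool := fun p => PySem.Str.isIn p.2 pvPunctuation with hP2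
  -- basic facts
  have hLfst : (L.map Prod.fst).Nodup := by
    rw [hL, List.map_map,
      show (Prod.fst ∘ fun k : Int => (k, m.getD k "_")) = id from rfl, List.map_id]
    exact PySem.List.nodup_pyRange_one 0 K
  have hLpos : L.Pairwise (fun a b => a.1 < b.1) := by
    rw [hL, List.pairwise_map]
    simpa using PySem.List.pairwise_lt_pyRange_one 0 K
  have hinj : ∀ a ∈ L, ∀ b ∈ L, a.1 = b.1 → a = b :=
    fun a ha b hb h => List.inj_on_of_nodup_map hLfst ha hb h
  -- the partition fold
  obtain ⟨h0, h1, h2p⟩ := pvFoldA m ks PySem.Dict.empty PySem.Dict.empty PySem.Dict.empty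
    (hks ▸ PySem.List.nodup_pyRange_one 0 K)
    (fun _ _ => PySem.Dict.contains_empty _) (fun _ _ => PySem.Dict.contains_empty _)
    (fun _ _ => PySem.Dict.contains_empty _)
  have hei : (PySem.Dict.empty : PySem.Dict Int String).items = [] := rfl
  rw [hei, List.nil_append] at h0 h1 h2p
  simp only [pvSortDict, h0, h1, h2p]
  set S0 := PySem.List.sorted (L.filter pLow) (fun p => p.2) with hS0
  set S1 := PySem.List.sorted (L.filter pUp) (fun p => p.2) with hS1
  set P := L.filter P2 with hP
  -- nodup of first components
  have hsubnod : ∀ q : Int × String → Bool, ((L.filter q).map Prod.fst).Nodup :=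
    fun q => hLfst.sublist (List.Sublist.map Prod.fst List.filter_sublist)
  have hnodS0 : (S0.map Prod.fst).Nodup :=
    (((PySem.List.sorted_perm _ _ _).map Prod.fst).nodup_iff).mpr (hsubnod pLow)
  have hnodS1 : (S1.map Prod.fst).Nodup :=
    (((PySem.List.sorted_perm _ _ _).map Prod.fst).nodup_iff).mpr (hsubnod pUp)
  have hS0items : (PySem.Dict.ofList S0).items = S0 := pvItems_ofList S0 hnodS0
  have hS1items : (PySem.Dict.ofList S1).items = S1 := pvItems_ofList S1 hnodS1
  -- memberships
  have hmem0 : ∀ a ∈ S0, a ∈ L ∧ pvStrIsupper a.2 = false ∧ PySem.Str.isIn a.2 pvPunctuation = false := by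
    intro a ha
    rw [hS0, PySem.List.mem_sorted, List.mem_filter, hpLow] at ha
    exact ⟨ha.1, by simpa [Bool.and_eq_true, Bool.not_eq_eq_eq_not] using ha.2⟩
  have hmem1 : ∀ a ∈ S1, a ∈ L ∧ pvStrIsupper a.2 = true ∧ PySem.Str.isIn a.2 pvPunctuation = false := by
    intro a ha
    rw [hS1, PySem.List.mem_sorted, List.mem_filter, hpUp] at ha
    exact ⟨ha.1, by simpa [Bool.and_eq_true] using ha.2⟩
  have hmem2 : ∀ a ∈ P, a ∈ L ∧ PySem.Str.isIn a.2 pvPunctuation = true := by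
    intro a ha
    rw [hP, List.mem_filter, hP2] at ha
    exact ⟨ha.1, ha.2⟩
  -- fresh keys for the two updates
  have hcont1 : ∀ a ∈ S1, (PySem.Dict.ofList S0).contains a.1 = false := by
    intro a ha
    rw [PySem.Dict.contains_eq_decide_mem_keys]
    simp only [PySem.Dict.keys, hS0items, decide_eq_false_iff_not]
    intro hmem
    obtain ⟨b, hb, hba⟩ := List.mem_map.mp hmem
    obtain ⟨hbL, hbu, _⟩ := hmem0 b hb
    obtain ⟨haL, hau, _⟩ := hmem1 a ha
    have := hinj b hbL a haL hba
    rw [this, hau] at hbu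
    exact absurd hbu (by decide)
  have hu1 : ((PySem.Dict.ofList S0).update S1).items = S0 ++ S1 := by
    show (List.foldl (fun acc p => acc.insert p.1 p.2) (PySem.Dict.ofList S0) S1).items = S0 ++ S1
    rw [PySem.Dict.items_foldl_insert_fresh S1 Prod.fst Prod.snd _ hcont1 hnodS1, hS0items]
    simp
  have hcont2 : ∀ a ∈ P, ((PySem.Dict.ofList S0).update S1).contains a.1 = false := by
    intro a ha
    rw [PySem.Dict.contains_eq_decide_mem_keys]
    simp only [PySem.Dict.keys, hu1, decide_eq_false_iff_not, List.map_append, List.mem_append]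
    rintro (hmem | hmem)
    · obtain ⟨b, hb, hba⟩ := List.mem_map.mp hmem
      obtain ⟨hbL, _, hbp⟩ := hmem0 b hb
      obtain ⟨haL, hap⟩ := hmem2 a ha
      have := hinj b hbL a haL hba
      rw [this, hap] at hbp
      exact absurd hbp (by decide)
    · obtain ⟨b, hb, hba⟩ := List.mem_map.mp hmem
      obtain ⟨hbL, _, hbp⟩ := hmem1 b hb
      obtain ⟨haL, hap⟩ := hmem2 a ha
      have := hinj b hbL a haL hba
      rw [this, hap] at hbp
      exact absurd hbp (by decide)
  have hnodP : (P.map Prod.fst).Nodup := hsubnod P2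
  have hu2 : (((PySem.Dict.ofList S0).update S1).update P).items = (S0 ++ S1) ++ P := by
    show (List.foldl (fun acc p => acc.insert p.1 p.2) ((PySem.Dict.ofList S0).update S1) P).items
      = (S0 ++ S1) ++ P
    rw [PySem.Dict.items_foldl_insert_fresh P Prod.fst Prod.snd _ hcont2 hnodP, hu1]
    simp
  -- B side
  rw [pvSorted2_eq_sorted_toLex]
  have hnodB : ((PySem.List.sorted L (fun x => toLex ((pvKey x).1, (pvKey x).2))).map Prod.fst).Nodup :=
    (((PySem.List.sorted_perm _ _ _).map Prod.fst).nodup_iff).mpr hLfst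
  rw [hS1items, hu2, pvItems_ofList _ hnodB]
  exact (pvCrux L hLpos).symm

-- ===== VERDICT (by name: the statement is the Claim_ definition above) =====
theorem sort_mapping_spec : Claim_equal_sort_mapping := by
  intro mapping K _
  exact sort_mapping_eq mapping K
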